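-- pv_equiv track=rewrite | github.com/TyZeroOne/Cryptographic-protocols | task-2/task_2.py | generate_regular_graph
-- ===== SOURCE A (Python) =====
-- def generate_regular_graph(n, k):
--     if (n * k) % 2 != 0:
--         return "Невозможно создать регулярный граф: произведение n и k должно быть четным"
--     if k >= n:
--         return "Невозможно создать регулярный граф: степень вершины должна быть меньше числа вершин"
--     graph = [[0] * n for _ in range(n)]
--     for i in range(n):
--         for j in range(1, k // 2 + 1):
--             neighbor = (i + j) % n
--             graph[i][neighbor] = 1
--             graph[neighbor][i] = 1
--     if k % 2 == 1:
--         for i in range(n // 2):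
--             neighbor = (i + n // 2) % n
--             graph[i][neighbor] = 1
--             graph[neighbor][i] = 1
--
--     return graph
-- ===== SOURCE B (Python) =====
-- def generate_regular_graph(n, k):
--     if (n * k) % 2 != 0:
--         return "Невозможно создать регулярный граф: произведение n и k должно быть четным"
--     if k >= n:
--         return "Невозможно создать регулярный граф: степень вершины должна быть меньше числа вершин"
--     offsets = set()
--     for j in range(1, k // 2 + 1):
--         offsets.add(j)
--         offsets.add(n - j)
--     if k % 2 == 1:
--         offsets.add(n // 2)
--     return [[1 if (i != j and (j - i) % n in offsets) else 0 for j in range(n)]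
--             for i in range(n)]
-- ===== Notes on version B (the rewrite author's own statement) =====
-- stated objective: alternative
-- what changed: A scatters edges vertex by vertex with in-place symmetric writes into a mutable matrix; B first computes the set of circulant offsets (j and n-j for j in 1..k//2, plus n//2 for odd k) and then builds the matrix directly, deciding every cell by a single membership test (j-i) % n in that set.
import Mathlib
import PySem

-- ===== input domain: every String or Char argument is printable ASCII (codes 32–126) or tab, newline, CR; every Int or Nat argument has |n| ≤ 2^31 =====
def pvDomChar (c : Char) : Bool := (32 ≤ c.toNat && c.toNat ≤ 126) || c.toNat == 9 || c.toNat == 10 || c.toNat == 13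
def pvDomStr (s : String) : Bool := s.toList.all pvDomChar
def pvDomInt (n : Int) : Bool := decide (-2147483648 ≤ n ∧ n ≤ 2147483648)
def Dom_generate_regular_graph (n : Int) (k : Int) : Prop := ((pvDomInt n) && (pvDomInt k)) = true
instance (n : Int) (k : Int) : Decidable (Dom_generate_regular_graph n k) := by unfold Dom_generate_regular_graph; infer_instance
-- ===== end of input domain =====

-- B replaces A's vertex-by-vertex edge scattering (in-place symmetric writes) by precomputing the
-- set of circulant offsets once and filling every cell directly by a membership test (alternative
-- decomposition, same asymptotic cost).

-- ===== PORT A =====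
-- graph[a][b] = 1  (row read, entry write, row write; indices are always in range when reached)
def pvSetEdge (g : List (List Int)) (a b : Int) : List (List Int) :=
  PySem.List.pySetD g a (PySem.List.pySetD (PySem.List.pyGetD g a []) b 1)

def generate_regular_graph (n : Int) (k : Int) : List (List Int) :=
  let graph := (PySem.List.pyRange 0 n 1).map (fun _ => List.replicate n.toNat (0 : Int))
  let graph := (PySem.List.pyRange 0 n 1).foldl (fun g i =>
      (PySem.List.pyRange 1 (PySem.Int.floordiv k 2 + 1) 1).foldl (fun g j =>
        pvSetEdge (pvSetEdge g i (PySem.Int.mod (i + j) n)) (PySem.Int.mod (i + j) n) i) g) graph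
  if PySem.Int.mod k 2 = 1 then
    (PySem.List.pyRange 0 (PySem.Int.floordiv n 2) 1).foldl (fun g i =>
      pvSetEdge (pvSetEdge g i (PySem.Int.mod (i + PySem.Int.floordiv n 2) n))
        (PySem.Int.mod (i + PySem.Int.floordiv n 2) n) i) graph
  else graph

-- ===== PORT B =====
-- offsets = set(); for j in range(1, k//2+1): offsets.add(j); offsets.add(n-j); if odd add n//2
def pvOffsets0 (n : Int) (k : Int) : PySem.Set Int :=
  (PySem.List.pyRange 1 (PySem.Int.floordiv k 2 + 1) 1).foldl
    (fun s j => PySem.Set.add (PySem.Set.add s j) (n - j)) PySem.Set.empty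

def pvOffsets (n : Int) (k : Int) : PySem.Set Int :=
  if PySem.Int.mod k 2 = 1 then PySem.Set.add (pvOffsets0 n k) (PySem.Int.floordiv n 2)
  else pvOffsets0 n k

def generate_regular_graph_alt (n : Int) (k : Int) : List (List Int) :=
  (PySem.List.pyRange 0 n 1).map (fun i =>
    (PySem.List.pyRange 0 n 1).map (fun j =>
      if i ≠ j ∧ PySem.Set.contains (pvOffsets n k) (PySem.Int.mod (j - i) n) = true
      then (1 : Int) else 0))

-- ===== PRECONDITION & SPEC =====
-- Pre_ excludes exactly the two guarded inputs (n*k odd, or k ≥ n) on which the Python A returns a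
-- Russian error STRING instead of a matrix — a value outside the declared return type List (List Int).
def Pre_generate_regular_graph (n : Int) (k : Int) : Prop :=
  PySem.Int.mod (n * k) 2 = 0 ∧ k < n
instance (n : Int) (k : Int) : Decidable (Pre_generate_regular_graph n k) := by
  unfold Pre_generate_regular_graph; infer_instance
def pvWitness_generate_regular_graph : Int × Int := (4, 2)

def Spec_generate_regular_graph (n : Int) (k : Int) (out : List (List Int)) : Prop :=
  out = generate_regular_graph_alt n k
instance (n : Int) (k : Int) (out : List (List Int)) : Decidable (Spec_generate_regular_graph n k out) := by
  unfold Spec_generate_regular_graph; infer_instance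

-- ===== CLAIM (what is proved, stated in full; the proofs are below) =====
def Claim_equal_generate_regular_graph : Prop :=
  ∀ (n : Int) (k : Int), Dom_generate_regular_graph n k →
    Pre_generate_regular_graph n k →
    Spec_generate_regular_graph n k (generate_regular_graph n k)

-- ===== LEMMAS AND PROOFS =====

-- entry g[x][y] as Python reads it (in-range Int indices)
def pvEnt (g : List (List Int)) (x y : Int) : Int :=
  PySem.List.pyGetD (PySem.List.pyGetD g x []) y 0

def pvShape (n : Int) (g : List (List Int)) : Prop :=
  g.length = n.toNat ∧ ∀ r ∈ g, r.length = n.toNat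

def pvPairBody (g : List (List Int)) (p : Int × Int) : List (List Int) :=
  pvSetEdge (pvSetEdge g p.1 p.2) p.2 p.1

def pvG0 (n : Int) : List (List Int) :=
  (PySem.List.pyRange 0 n 1).map (fun _ => List.replicate n.toNat (0 : Int))

def pvP1 (n k : Int) : List (Int × Int) :=
  (PySem.List.pyRange 0 n 1).flatMap (fun i =>
    (PySem.List.pyRange 1 (PySem.Int.floordiv k 2 + 1) 1).map (fun j => (i, PySem.Int.mod (i + j) n)))

def pvP2 (n : Int) : List (Int × Int) :=
  (PySem.List.pyRange 0 (PySem.Int.floordiv n 2) 1).map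
    (fun i => (i, PySem.Int.mod (i + PySem.Int.floordiv n 2) n))

theorem pvShape_setEdge {n : Int} {g : List (List Int)} (hg : pvShape n g)
    (a b : Int) (ha : 0 ≤ a) : pvShape n (pvSetEdge g a b) := by
  obtain ⟨hlen, hrow⟩ := hg
  unfold pvSetEdge
  rw [PySem.List.pySetD_of_nonneg _ _ ha]
  refine ⟨by simp [hlen], ?_⟩
  intro r hr
  by_cases hlt : a.toNat < g.length
  · rcases List.mem_or_eq_of_mem_set hr with h | h
    · exact hrow r h
    · subst h
      rw [PySem.List.length_pySetD, PySem.List.pyGetD_of_nonneg _ _ ha,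
          List.getD_eq_getElem _ _ hlt]
      exact hrow _ (List.getElem_mem _)
  · rw [List.set_eq_of_length_le (by omega)] at hr
    exact hrow r hr

theorem pvEnt_setEdge {n : Int} (hn : 0 < n) {g : List (List Int)} (hg : pvShape n g)
    {a b x y : Int} (ha : 0 ≤ a ∧ a < n) (hb : 0 ≤ b ∧ b < n)
    (hx : 0 ≤ x ∧ x < n) (hy : 0 ≤ y ∧ y < n) :
    pvEnt (pvSetEdge g a b) x y = if x = a ∧ y = b then 1 else pvEnt g x y := by
  obtain ⟨hlen, hrow⟩ := hg
  have hxN : x.toNat < g.length := by omega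
  have haN : a.toNat < g.length := by omega
  have hrowa : (PySem.List.pyGetD g a ([] : List Int)) = g[a.toNat] := by
    rw [PySem.List.pyGetD_of_nonneg _ _ ha.1, List.getD_eq_getElem _ _ haN]
  have hrowx : (PySem.List.pyGetD g x ([] : List Int)) = g[x.toNat] := by
    rw [PySem.List.pyGetD_of_nonneg _ _ hx.1, List.getD_eq_getElem _ _ hxN]
  have hlena : (g[a.toNat] : List Int).length = n.toNat := hrow _ (List.getElem_mem _)
  unfold pvEnt pvSetEdge
  rw [PySem.List.pySetD_of_nonneg _ _ ha.1,
      PySem.List.pyGetD_of_nonneg _ _ hx.1,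
      List.getD_eq_getElem _ _ (by simpa using hxN),
      List.getElem_set]
  by_cases hxa : x = a
  · subst hxa
    rw [if_pos rfl, hrowa,
        PySem.List.pySetD_of_nonneg _ _ hb.1,
        PySem.List.pyGetD_of_nonneg _ _ hy.1,
        List.getD_eq_getElem _ _ (by simp only [List.length_set]; omega),
        List.getElem_set]
    by_cases hyb : y = b
    · subst hyb
      rw [if_pos rfl, if_pos ⟨rfl, rfl⟩]
    · rw [if_neg (by omega), if_neg (by tauto),
          PySem.List.pyGetD_of_nonneg _ _ hy.1,
          List.getD_eq_getElem _ _ (by omega)]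
  · rw [if_neg (by omega), if_neg (by tauto), hrowx,
        PySem.List.pyGetD_of_nonneg _ _ hy.1]

theorem pvEnt_pair {n : Int} (hn : 0 < n) {g : List (List Int)} (hg : pvShape n g)
    {a b x y : Int} (ha : 0 ≤ a ∧ a < n) (hb : 0 ≤ b ∧ b < n)
    (hx : 0 ≤ x ∧ x < n) (hy : 0 ≤ y ∧ y < n) :
    pvEnt (pvSetEdge (pvSetEdge g a b) b a) x y
      = if (x = a ∧ y = b) ∨ (x = b ∧ y = a) then 1 else pvEnt g x y := by
  rw [pvEnt_setEdge hn (pvShape_setEdge hg a b ha.1) hb ha hx hy,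
      pvEnt_setEdge hn hg ha hb hx hy]
  split_ifs <;> tauto

theorem pvEnt_foldl_pairs {n : Int} (hn : 0 < n) (ps : List (Int × Int))
    (hps : ∀ p ∈ ps, (0 ≤ p.1 ∧ p.1 < n) ∧ (0 ≤ p.2 ∧ p.2 < n))
    {g : List (List Int)} (hg : pvShape n g) :
    pvShape n (ps.foldl pvPairBody g) ∧
    ∀ x y : Int, (0 ≤ x ∧ x < n) → (0 ≤ y ∧ y < n) →
      pvEnt (ps.foldl pvPairBody g) x y
        = if (∃ p ∈ ps, (x = p.1 ∧ y = p.2) ∨ (x = p.2 ∧ y = p.1)) then 1 else pvEnt g x y := by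
  induction ps generalizing g with
  | nil => simpa using hg
  | cons p ps ih =>
    have hp := hps p (List.mem_cons_self ..)
    have hg' : pvShape n (pvPairBody g p) :=
      pvShape_setEdge (pvShape_setEdge hg p.1 p.2 hp.1.1) p.2 p.1 hp.2.1
    have ih' := ih (fun q hq => hps q (List.mem_cons_of_mem _ hq)) hg'
    refine ⟨by simpa [List.foldl_cons] using ih'.1, ?_⟩
    intro x y hx hy
    rw [List.foldl_cons, ih'.2 x y hx hy]
    unfold pvPairBody
    rw [pvEnt_pair hn hg hp.1 hp.2 hx hy]
    simp only [List.exists_mem_cons_iff]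
    by_cases h1 : ∃ q ∈ ps, (x = q.1 ∧ y = q.2) ∨ (x = q.2 ∧ y = q.1)
    · rw [if_pos h1, if_pos (Or.inr h1)]
    · rw [if_neg h1]
      by_cases h2 : (x = p.1 ∧ y = p.2) ∨ (x = p.2 ∧ y = p.1)
      · rw [if_pos h2, if_pos (Or.inl h2)]
      · rw [if_neg h2, if_neg (by rintro (h | h); exacts [h2 h, h1 h])]

theorem pvFoldl_double (l m : List Int) (h : Int → Int → Int) (g : List (List Int)) :
    l.foldl (fun g i => m.foldl (fun g j =>
        pvSetEdge (pvSetEdge g i (h i j)) (h i j) i) g) g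
      = (l.flatMap (fun i => m.map (fun j => (i, h i j)))).foldl pvPairBody g := by
  induction l generalizing g with
  | nil => rfl
  | cons i l ih =>
    simp only [List.foldl_cons, List.flatMap_cons, List.foldl_append, List.foldl_map, ih]
    rfl

theorem pvMem_fold_add (n : Int) (l : List Int) (s : PySem.Set Int) (m : Int) :
    m ∈ l.foldl (fun s j => PySem.Set.add (PySem.Set.add s j) (n - j)) s
      ↔ m ∈ s ∨ ∃ j ∈ l, m = j ∨ m = n - j := by
  induction l generalizing s with
  | nil => simp
  | cons j l ih =>
    rw [List.foldl_cons, ih]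
    simp only [PySem.Set.mem_add, List.exists_mem_cons_iff, or_assoc]

theorem pvMod_small2 (a n : Int) (hn : 0 < n) (h0 : 0 ≤ a) (h2 : a < 2 * n) :
    PySem.Int.mod a n = if a < n then a else a - n := by
  rw [PySem.Int.mod_eq_emod_of_pos hn]
  split_ifs with h
  · exact Int.emod_eq_of_lt h0 h
  · have h1 : a % n = (a - n) % n := by
      conv_lhs => rw [show a = (a - n) + n * 1 by ring]
      rw [Int.add_mul_emod_self_left]
    rw [h1]
    exact Int.emod_eq_of_lt (by omega) (by omega)

theorem pvMod_diff (x y n : Int) (hn : 0 < n) (hx : 0 ≤ x ∧ x < n) (hy : 0 ≤ y ∧ y < n) :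
    PySem.Int.mod (y - x) n = if x ≤ y then y - x else y - x + n := by
  rw [PySem.Int.mod_eq_emod_of_pos hn]
  split_ifs with h
  · exact Int.emod_eq_of_lt (by omega) (by omega)
  · have h1 : (y - x) % n = (y - x + n) % n := by
      conv_lhs => rw [show y - x = (y - x + n) + n * (-1) by ring]
      rw [Int.add_mul_emod_self_left]
    rw [h1]
    exact Int.emod_eq_of_lt (by omega) (by omega)

-- the arithmetic core, part 1: the k//2 sweep
theorem pvPart1 (n k x y : Int) (hn : 0 < n) (hk : k < n)
    (hx : 0 ≤ x ∧ x < n) (hy : 0 ≤ y ∧ y < n) :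
    ((∃ p ∈ pvP1 n k, (x = p.1 ∧ y = p.2) ∨ (x = p.2 ∧ y = p.1))
      ↔ (∃ j ∈ PySem.List.pyRange 1 (PySem.Int.floordiv k 2 + 1) 1,
        PySem.Int.mod (y - x) n = j ∨ PySem.Int.mod (y - x) n = n - j)) := by
  have hK : PySem.Int.floordiv k 2 = k / 2 := PySem.Int.floordiv_eq_ediv_of_pos (by norm_num)
  rw [pvMod_diff x y n hn hx hy]
  simp only [pvP1, List.mem_flatMap, List.mem_map, PySem.List.mem_pyRange_one, hK]
  constructor
  · rintro ⟨p, ⟨i, hi, j, hj, rfl⟩, hcase⟩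
    refine ⟨j, by omega, ?_⟩
    have hjn : j < n := by omega
    rw [pvMod_small2 (i + j) n hn (by omega) (by omega)] at hcase
    split_ifs at hcase ⊢ <;> omega
  · rintro ⟨j, hj, hD⟩
    have hjn : j < n := by omega
    split_ifs at hD with hxy
    · rcases hD with h | h
      · refine ⟨(x, PySem.Int.mod (x + j) n), ⟨x, by omega, j, hj, rfl⟩, Or.inl ⟨rfl, ?_⟩⟩
        rw [pvMod_small2 (x + j) n hn (by omega) (by omega)]
        split_ifs <;> omega
      · refine ⟨(y, PySem.Int.mod (y + j) n), ⟨y, by omega, j, hj, rfl⟩, Or.inr ⟨?_, rfl⟩⟩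
        rw [pvMod_small2 (y + j) n hn (by omega) (by omega)]
        split_ifs <;> omega
    · rcases hD with h | h
      · refine ⟨(x, PySem.Int.mod (x + j) n), ⟨x, by omega, j, hj, rfl⟩, Or.inl ⟨rfl, ?_⟩⟩
        rw [pvMod_small2 (x + j) n hn (by omega) (by omega)]
        split_ifs <;> omega
      · refine ⟨(y, PySem.Int.mod (y + j) n), ⟨y, by omega, j, hj, rfl⟩, Or.inr ⟨?_, rfl⟩⟩
        rw [pvMod_small2 (y + j) n hn (by omega) (by omega)]
        split_ifs <;> omega

-- the arithmetic core, part 2: the antipodal sweep (k odd forces n even under Pre_)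
theorem pvPart2 (n x y : Int) (hn : 0 < n) (h2 : 2 ∣ n)
    (hx : 0 ≤ x ∧ x < n) (hy : 0 ≤ y ∧ y < n) :
    ((∃ p ∈ pvP2 n, (x = p.1 ∧ y = p.2) ∨ (x = p.2 ∧ y = p.1))
      ↔ PySem.Int.mod (y - x) n = PySem.Int.floordiv n 2) := by
  have hH : PySem.Int.floordiv n 2 = n / 2 := PySem.Int.floordiv_eq_ediv_of_pos (by norm_num)
  obtain ⟨h, rfl⟩ := h2
  have hh2 : (2 * h) / 2 = h := by omega
  rw [pvMod_diff x y (2 * h) hn hx hy]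
  simp only [pvP2, List.mem_map, PySem.List.mem_pyRange_one, hH, hh2]
  constructor
  · rintro ⟨p, ⟨i, hi, rfl⟩, hcase⟩
    rw [pvMod_small2 (i + h) (2 * h) hn (by omega) (by omega)] at hcase
    split_ifs at hcase ⊢ <;> omega
  · intro hD
    split_ifs at hD with hxy
    · refine ⟨(x, PySem.Int.mod (x + h) (2 * h)), ⟨x, by omega, rfl⟩, Or.inl ⟨rfl, ?_⟩⟩
      rw [pvMod_small2 (x + h) (2 * h) hn (by omega) (by omega)]
      split_ifs <;> omega
    · refine ⟨(y, PySem.Int.mod (y + h) (2 * h)), ⟨y, by omega, rfl⟩, Or.inr ⟨?_, rfl⟩⟩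
      rw [pvMod_small2 (y + h) (2 * h) hn (by omega) (by omega)]
      split_ifs <;> omega

-- membership in B's offset set
theorem pvMem_offsets (n k m : Int) :
    m ∈ pvOffsets n k ↔
      (∃ j ∈ PySem.List.pyRange 1 (PySem.Int.floordiv k 2 + 1) 1, m = j ∨ m = n - j) ∨
      (PySem.Int.mod k 2 = 1 ∧ m = PySem.Int.floordiv n 2) := by
  have hemp : (m ∈ (PySem.Set.empty : PySem.Set Int)) ↔ False := by
    simp [PySem.Set.empty]
  unfold pvOffsets pvOffsets0
  split_ifs with h
  · rw [PySem.Set.mem_add, pvMem_fold_add, hemp, false_or]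
    exact ⟨fun hOr => hOr.imp id (fun hm => ⟨h, hm⟩), fun hOr => hOr.imp id (fun hm => hm.2)⟩
  · rw [pvMem_fold_add, hemp, false_or]
    exact ⟨fun hE => Or.inl hE, fun hOr => hOr.resolve_right (fun hc => h hc.1)⟩

theorem pvShape_G0 {n : Int} (_hn : 0 < n) : pvShape n (pvG0 n) := by
  unfold pvShape pvG0
  constructor
  · simp [PySem.List.length_pyRange_one]
  · intro r hr
    simp only [List.mem_map] at hr
    obtain ⟨_, _, rfl⟩ := hr
    simp

theorem pvEnt_G0 {n : Int} (hn : 0 < n) (x y : Int)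
    (hx : 0 ≤ x ∧ x < n) (hy : 0 ≤ y ∧ y < n) : pvEnt (pvG0 n) x y = 0 := by
  unfold pvEnt pvG0
  rw [PySem.List.pyGetD_of_nonneg _ _ hx.1,
      List.getD_eq_getElem _ _ (by
        simp only [List.length_map, PySem.List.length_pyRange_one]; omega),
      List.getElem_map,
      PySem.List.pyGetD_of_nonneg _ _ hy.1,
      List.getD_eq_getElem _ _ (by simp only [List.length_replicate]; omega),
      List.getElem_replicate]

theorem pvEnt_eq_getElem {n : Int} {g : List (List Int)} (_hg : pvShape n g)
    (r c : Nat) (_hr : r < n.toNat) (_hc : c < n.toNat)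
    (h1 : r < g.length) (h2 : c < (g[r]'h1).length) :
    pvEnt g (r : Int) (c : Int) = (g[r]'h1)[c]'h2 := by
  unfold pvEnt
  rw [PySem.List.pyGetD_of_nonneg _ _ (Int.natCast_nonneg r)]
  simp only [Int.toNat_natCast]
  rw [List.getD_eq_getElem _ _ h1,
      PySem.List.pyGetD_of_nonneg _ _ (Int.natCast_nonneg c)]
  simp only [Int.toNat_natCast]
  rw [List.getD_eq_getElem _ _ h2]

theorem pvA_eq (n k : Int) : generate_regular_graph n k =
    if PySem.Int.mod k 2 = 1 then
      (pvP2 n).foldl pvPairBody ((pvP1 n k).foldl pvPairBody (pvG0 n))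
    else (pvP1 n k).foldl pvPairBody (pvG0 n) := by
  simp only [generate_regular_graph, pvP1, pvP2, pvG0, pvFoldl_double, List.foldl_map]
  rfl

-- ===== VERDICT (by name: the statement is the Claim_ definition above) =====
theorem generate_regular_graph_spec : Claim_equal_generate_regular_graph := by
  intro n k _ hPre
  obtain ⟨heven, hk⟩ := hPre
  unfold Spec_generate_regular_graph
  by_cases hn : 0 < n
  case neg =>
    have h1 : PySem.List.pyRange 0 n 1 = [] := PySem.List.pyRange_one_eq_nil (by omega)
    have h2 : PySem.List.pyRange 0 (PySem.Int.floordiv n 2) 1 = [] := by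
      apply PySem.List.pyRange_one_eq_nil
      rw [PySem.Int.floordiv_eq_ediv_of_pos (by norm_num)]; omega
    unfold generate_regular_graph generate_regular_graph_alt
    rw [h1, h2]
    simp
  case pos =>
    have hK : PySem.Int.floordiv k 2 = k / 2 := PySem.Int.floordiv_eq_ediv_of_pos (by norm_num)
    have hH : PySem.Int.floordiv n 2 = n / 2 := PySem.Int.floordiv_eq_ediv_of_pos (by norm_num)
    have hbound1 : ∀ p ∈ pvP1 n k, (0 ≤ p.1 ∧ p.1 < n) ∧ (0 ≤ p.2 ∧ p.2 < n) := by
      intro p hp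
      simp only [pvP1, List.mem_flatMap, List.mem_map, PySem.List.mem_pyRange_one] at hp
      obtain ⟨i, hi, j, hj, rfl⟩ := hp
      exact ⟨⟨hi.1, hi.2⟩, PySem.Int.mod_nonneg _ hn, PySem.Int.mod_lt _ hn⟩
    have hbound2 : ∀ p ∈ pvP2 n, (0 ≤ p.1 ∧ p.1 < n) ∧ (0 ≤ p.2 ∧ p.2 < n) := by
      intro p hp
      simp only [pvP2, List.mem_map, PySem.List.mem_pyRange_one, hH] at hp
      obtain ⟨i, hi, rfl⟩ := hp
      exact ⟨⟨hi.1, by omega⟩, PySem.Int.mod_nonneg _ hn, PySem.Int.mod_lt _ hn⟩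
    have hfold1 := pvEnt_foldl_pairs hn (pvP1 n k) hbound1 (pvShape_G0 hn)
    have hfold2 := pvEnt_foldl_pairs hn (pvP2 n) hbound2 hfold1.1
    have hAshape : pvShape n (generate_regular_graph n k) := by
      rw [pvA_eq]
      split_ifs with ho
      · exact hfold2.1
      · exact hfold1.1
    have hAent : ∀ x y : Int, (0 ≤ x ∧ x < n) → (0 ≤ y ∧ y < n) →
        pvEnt (generate_regular_graph n k) x y =
          if (∃ p ∈ pvP1 n k, (x = p.1 ∧ y = p.2) ∨ (x = p.2 ∧ y = p.1)) ∨
             (PySem.Int.mod k 2 = 1 ∧ ∃ p ∈ pvP2 n, (x = p.1 ∧ y = p.2) ∨ (x = p.2 ∧ y = p.1))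
          then 1 else 0 := by
      intro x y hx hy
      rw [pvA_eq]
      by_cases ho : PySem.Int.mod k 2 = 1
      · rw [if_pos ho, hfold2.2 x y hx hy, hfold1.2 x y hx hy, pvEnt_G0 hn x y hx hy]
        by_cases e2 : ∃ p ∈ pvP2 n, (x = p.1 ∧ y = p.2) ∨ (x = p.2 ∧ y = p.1)
        · rw [if_pos e2, if_pos (Or.inr ⟨ho, e2⟩)]
        · rw [if_neg e2]
          by_cases e1 : ∃ p ∈ pvP1 n k, (x = p.1 ∧ y = p.2) ∨ (x = p.2 ∧ y = p.1)
          · rw [if_pos e1, if_pos (Or.inl e1)]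
          · rw [if_neg e1, if_neg (by rintro (h | h); exacts [e1 h, e2 h.2])]
      · rw [if_neg ho, hfold1.2 x y hx hy, pvEnt_G0 hn x y hx hy]
        by_cases e1 : ∃ p ∈ pvP1 n k, (x = p.1 ∧ y = p.2) ∨ (x = p.2 ∧ y = p.1)
        · rw [if_pos e1, if_pos (Or.inl e1)]
        · rw [if_neg e1, if_neg (by rintro (h | h); exacts [e1 h, ho h.1])]
    have hBlen : (generate_regular_graph_alt n k).length = n.toNat := by
      simp [generate_regular_graph_alt, PySem.List.length_pyRange_one]
    apply List.ext_getElem (by rw [hAshape.1, hBlen])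
    intro r h1 h2
    have hrN : r < n.toNat := by rw [hAshape.1] at h1; exact h1
    have hBrow : (generate_regular_graph_alt n k)[r]'h2 =
        (PySem.List.pyRange 0 n 1).map (fun j =>
          if (r : Int) ≠ j ∧
             PySem.Set.contains (pvOffsets n k) (PySem.Int.mod (j - (r : Int)) n) = true
          then (1 : Int) else 0) := by
      simp [generate_regular_graph_alt, List.getElem_map, PySem.List.getElem_pyRange_one]
    apply List.ext_getElem
    · rw [hAshape.2 _ (List.getElem_mem _), hBrow]
      simp [PySem.List.length_pyRange_one]
    intro c hc1 hc2
    have hcN : c < n.toNat := by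
      have := hAshape.2 _ (List.getElem_mem h1)
      omega
    have hxb : 0 ≤ ((r : Nat) : Int) ∧ ((r : Nat) : Int) < n := ⟨Int.natCast_nonneg r, by omega⟩
    have hyb : 0 ≤ ((c : Nat) : Int) ∧ ((c : Nat) : Int) < n := ⟨Int.natCast_nonneg c, by omega⟩
    rw [← pvEnt_eq_getElem hAshape r c hrN hcN h1 hc1, hAent _ _ hxb hyb]
    have hBval : ((generate_regular_graph_alt n k)[r]'h2)[c]'hc2 =
        if (r : Int) ≠ (c : Int) ∧
           PySem.Set.contains (pvOffsets n k) (PySem.Int.mod ((c : Int) - (r : Int)) n) = true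
        then (1 : Int) else 0 := by
      rw [List.getElem_of_eq hBrow hc2]
      simp [List.getElem_map, PySem.List.getElem_pyRange_one]
    rw [hBval]
    -- the two conditions are equivalent
    have hmod0 : PySem.Int.mod ((r : Int) - (r : Int)) n = 0 := by
      simp [PySem.Int.mod_eq_emod_of_pos hn]
    have hP1 := pvPart1 n k (r : Int) (c : Int) hn hk hxb hyb
    have h2n : PySem.Int.mod k 2 = 1 → 2 ∣ n := by
      intro ho
      have hnk : (2 : Int) ∣ n * k := (PySem.Int.mod_eq_zero_iff_dvd (n * k) 2).mp heven
      rcases (Int.prime_two.dvd_mul).mp hnk with h | h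
      · exact h
      · rw [← PySem.Int.mod_eq_zero_iff_dvd] at h
        rw [h] at ho
        exact absurd ho (by norm_num)
    apply if_congr _ rfl rfl
    constructor
    · rintro (hE1 | ⟨ho, hE2⟩)
      · have hE := hP1.mp hE1
        refine ⟨?_, (PySem.Set.contains_iff _ _).mpr ((pvMem_offsets n k _).mpr (Or.inl hE))⟩
        obtain ⟨j, hj, hD⟩ := hE
        rw [PySem.List.mem_pyRange_one, hK] at hj
        intro hxy
        rw [← hxy, hmod0] at hD
        omega
      · have hD := (pvPart2 n (r : Int) (c : Int) hn (h2n ho) hxb hyb).mp hE2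
        refine ⟨?_, (PySem.Set.contains_iff _ _).mpr ((pvMem_offsets n k _).mpr (Or.inr ⟨ho, hD⟩))⟩
        intro hxy
        rw [← hxy, hmod0] at hD
        obtain ⟨t, rfl⟩ := h2n ho
        rw [hH] at hD
        omega
    · rintro ⟨hne, hc⟩
      rcases (pvMem_offsets n k _).mp ((PySem.Set.contains_iff _ _).mp hc) with hE | ⟨ho, hD⟩
      · exact Or.inl (hP1.mpr hE)
      · exact Or.inr ⟨ho, (pvPart2 n (r : Int) (c : Int) hn (h2n ho) hxb hyb).mpr hD⟩
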